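-- pv_equiv track=rewrite | github.com/Ujimatsu-Chiya/Advent-of-Code-Python-Solution | 2023/23D13.py | parse
-- ===== SOURCE A (Python) =====
-- def parse(src):
--     ls = []
--     t = src.strip().split('\n')
--     i = 0
--     while i < len(t):
--         if len(t[i]) > 0:
--             j = i
--             while j < len(t) and len(t[j]) > 0:
--                 j += 1
--             ls.append(t[i:j])
--             i = j
--         else:
--             i += 1
--     return ls
-- ===== SOURCE B (Python) =====
-- def parse(src):
--     blocks, cur = [], []
--     for line in src.strip().split('\n'):
--         if line:
--             cur.append(line)
--         elif cur:
--             blocks.append(cur)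
--             cur = []
--     if cur:
--         blocks.append(cur)
--     return blocks
-- ===== Notes on version B (the rewrite author's own statement) =====
-- stated objective: simpler
-- what changed: Replaced A's index-walking nested while loop (inner scan to find each block's end, then slicing) by a single linear pass with a current-block accumulator that flushes on empty lines.
import Mathlib
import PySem

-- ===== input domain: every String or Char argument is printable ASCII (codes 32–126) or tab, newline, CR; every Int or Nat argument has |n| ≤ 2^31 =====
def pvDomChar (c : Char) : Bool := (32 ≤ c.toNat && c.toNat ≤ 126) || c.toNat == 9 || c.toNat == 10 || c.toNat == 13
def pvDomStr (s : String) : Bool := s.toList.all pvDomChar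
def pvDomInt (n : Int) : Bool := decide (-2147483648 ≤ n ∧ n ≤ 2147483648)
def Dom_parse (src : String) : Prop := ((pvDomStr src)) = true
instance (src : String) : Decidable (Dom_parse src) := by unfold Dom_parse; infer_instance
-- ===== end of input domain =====

-- B replaces A's index-walking nested while loop by one linear pass with a
-- current-block accumulator flushed at empty lines (objective: simpler).

-- ===== PORT A =====
-- inner while: `while j < len(t) and len(t[j]) > 0: j += 1`
-- (t[j] is read only with 0 ≤ j < len t, so getD is exact here)
def parseInner (t : List String) (j : Nat) : Nat :=
  if _h : j < t.length ∧ 0 < PySem.Str.len (t.getD j "") then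
    parseInner t (j + 1)
  else j
termination_by t.length - j
decreasing_by omega

-- termination fact the outer loop cites: the inner while strictly advances past i
theorem parseInner_ge (t : List String) (j : Nat) : j ≤ parseInner t j := by
  fun_induction parseInner t j with
  | case1 j h ih => omega
  | case2 j h => omega

-- outer while over index i, accumulating ls (t[i:j] via PySem.List.slice)
def parseLoop (t : List String) (ls : List (List String)) (i : Nat) : List (List String) :=
  if _hi : i < t.length then
    if _hp : 0 < PySem.Str.len (t.getD i "") then
      -- j = parseInner t i (Python's inner while result), used for the slice and the next index
      parseLoop t (ls ++ [PySem.List.slice t (some (i : Int)) (some (parseInner t i : Int))])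
        (parseInner t i)
    else
      parseLoop t ls (i + 1)
  else ls
termination_by t.length - i
decreasing_by
  · have : i + 1 ≤ parseInner t (i + 1) := parseInner_ge t (i + 1)
    have hj : parseInner t i = parseInner t (i + 1) := by
      conv_lhs => unfold parseInner
      rw [dif_pos ⟨_hi, _hp⟩]
    omega
  · omega

def parse (src : String) : List (List String) :=
  let t := (PySem.Str.split? (PySem.Str.strip src) "\n").getD []
  parseLoop t [] 0

-- ===== PORT B =====
-- one pass: grow cur on non-empty lines, flush it to blocks on empty lines
def parseStep (p : List (List String) × List String) (line : String) :
    List (List String) × List String :=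
  if 0 < PySem.Str.len line then (p.1, p.2 ++ [line])
  else if p.2 ≠ [] then (p.1 ++ [p.2], [])
  else p

def parse_alt (src : String) : List (List String) :=
  let t := (PySem.Str.split? (PySem.Str.strip src) "\n").getD []
  let r := t.foldl parseStep ([], [])
  if r.2 ≠ [] then r.1 ++ [r.2] else r.1

-- ===== PRECONDITION & SPEC =====
def Spec_parse (src : String) (out : List (List String)) : Prop := out = parse_alt src
instance (src : String) (out : List (List String)) : Decidable (Spec_parse src out) := by unfold Spec_parse; infer_instance

-- ===== CLAIM (what is proved, stated in full; the proofs are below) =====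
def Claim_equal_parse : Prop := ∀ (src : String), Dom_parse src → Spec_parse src (parse src)

-- ===== LEMMAS AND PROOFS =====

-- the common mathematical shape of the result: maximal runs of non-empty lines
def pvP (s : String) : Bool := decide (0 < PySem.Str.len s)

def pvBlocks : List String → List (List String)
  | [] => []
  | l :: ls =>
    if pvP l then (l :: ls.takeWhile pvP) :: pvBlocks (ls.dropWhile pvP)
    else pvBlocks ls
termination_by ls => ls.length
decreasing_by
  · have := List.length_dropWhile_le pvP ls; simpa using Nat.lt_succ_of_le this
  · simp

-- two generic takeWhile facts used to relate A's index arithmetic to the run shape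
theorem pvTake_takeWhile {α : Type} (p : α → Bool) (l : List α) :
    l.take (l.takeWhile p).length = l.takeWhile p := by
  induction l with
  | nil => simp
  | cons a l ih => by_cases h : p a <;> simp [h, ih]

theorem pvDrop_takeWhile {α : Type} (p : α → Bool) (l : List α) :
    l.drop (l.takeWhile p).length = l.dropWhile p := by
  induction l with
  | nil => simp
  | cons a l ih => by_cases h : p a <;> simp [h, ih]

theorem parseInner_char (t : List String) (j : Nat) :
    parseInner t j = j + ((t.drop j).takeWhile pvP).length := by
  fun_induction parseInner t j with
  | case1 j h ih =>
    obtain ⟨hj, hp⟩ := h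
    rw [List.drop_eq_getElem_cons hj] at *
    have hpv : pvP t[j] = true := by
      simp only [pvP, decide_eq_true_eq]
      simpa [List.getD_eq_getElem?_getD, List.getElem?_eq_getElem hj] using hp
    rw [List.takeWhile_cons_of_pos hpv]
    simp [ih]; omega
  | case2 j h =>
    rcases Nat.lt_or_ge j t.length with hj | hj
    · have hp : ¬ 0 < PySem.Str.len (t.getD j "") := by tauto
      rw [List.drop_eq_getElem_cons hj]
      have hpv : pvP t[j] = false := by
        simp only [pvP, decide_eq_false_iff_not]
        simpa [List.getD_eq_getElem?_getD, List.getElem?_eq_getElem hj] using hp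
      rw [List.takeWhile_cons_of_neg (by simp [hpv])]; simp
    · rw [List.drop_of_length_le hj]; simp

theorem parseLoop_char (t : List String) (ls : List (List String)) (i : Nat) :
    parseLoop t ls i = ls ++ pvBlocks (t.drop i) := by
  fun_induction parseLoop t ls i with
  | case1 ls i hi hp ih =>
    rw [ih]
    set j := parseInner t i with hjdef
    have hdrop : t.drop i = t[i] :: t.drop (i + 1) := List.drop_eq_getElem_cons hi
    have hpv : pvP t[i] = true := by
      simp only [pvP, decide_eq_true_eq]
      simpa [List.getD_eq_getElem?_getD, List.getElem?_eq_getElem hi] using hp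
    set k := ((t.drop (i+1)).takeWhile pvP).length with hk
    have hj : j = i + (k + 1) := by
      rw [hjdef, parseInner_char, hdrop, List.takeWhile_cons_of_pos hpv]
      simp [hk]
    -- the slice t[i:j] is exactly the current maximal non-empty run
    have hslice : PySem.List.slice t (some (i : Int)) (some (j : Int)) =
        t[i] :: (t.drop (i+1)).takeWhile pvP := by
      rw [PySem.List.slice_toNat t (by positivity) (by positivity)]
      simp only [Int.toNat_natCast]
      rw [hj, hdrop, show i + (k + 1) - i = k + 1 from by omega, List.take_succ_cons,
        hk, pvTake_takeWhile]
    have hdropj : t.drop j = (t.drop (i+1)).dropWhile pvP := by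
      rw [hj, show i + (k + 1) = (i+1) + k from by omega, ← List.drop_drop,
        hk, pvDrop_takeWhile]
    rw [hslice, hdropj]
    conv_rhs => rw [hdrop]
    rw [pvBlocks, if_pos hpv]
    simp
  | case2 ls i hi hp ih =>
    rw [ih]
    have hdrop : t.drop i = t[i] :: t.drop (i + 1) := List.drop_eq_getElem_cons hi
    have hpv : pvP t[i] = false := by
      simp only [pvP, decide_eq_false_iff_not]
      simpa [List.getD_eq_getElem?_getD, List.getElem?_eq_getElem hi] using hp
    conv_rhs => rw [hdrop]
    rw [pvBlocks, if_neg (by simp [hpv])]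
  | case3 ls i hi =>
    rw [List.drop_of_length_le (by omega)]; simp [pvBlocks]

theorem parseFold_char (ls : List String) (bl : List (List String)) (cur : List String) :
    (let r := ls.foldl parseStep (bl, cur); if r.2 ≠ [] then r.1 ++ [r.2] else r.1) =
    bl ++ (if cur = [] then pvBlocks ls
           else (cur ++ ls.takeWhile pvP) :: pvBlocks (ls.dropWhile pvP)) := by
  induction ls generalizing bl cur with
  | nil =>
    by_cases hc : cur = [] <;> simp [hc, pvBlocks]
  | cons l rest ih =>
    simp only [List.foldl_cons]
    by_cases hp : pvP l
    · have hp' : 0 < PySem.Str.len l := by simpa [pvP] using hp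
      rw [show parseStep (bl, cur) l = (bl, cur ++ [l]) by unfold parseStep; rw [if_pos hp']]
      rw [ih]
      rw [if_neg (by simp)]
      rw [List.takeWhile_cons_of_pos hp, List.dropWhile_cons_of_pos hp]
      by_cases hc : cur = [] <;>
        simp [hc, pvBlocks, hp]
    · have hp' : ¬ 0 < PySem.Str.len l := by simpa [pvP] using hp
      rw [List.takeWhile_cons_of_neg (by simpa using hp),
          List.dropWhile_cons_of_neg (by simpa using hp)]
      by_cases hc : cur = []
      · rw [show parseStep (bl, cur) l = (bl, cur) by
            unfold parseStep; rw [if_neg hp', if_neg (by simp [hc])]]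
        rw [ih, hc]
        simp [pvBlocks, hp]
      · rw [show parseStep (bl, cur) l = (bl ++ [cur], []) by
            unfold parseStep; rw [if_neg hp', if_pos hc]]
        rw [ih]
        simp [hc, pvBlocks, hp]

theorem parse_core (t : List String) :
    parseLoop t [] 0 =
    (let r := t.foldl parseStep ([], []); if r.2 ≠ [] then r.1 ++ [r.2] else r.1) := by
  rw [parseLoop_char, parseFold_char]
  simp

-- ===== VERDICT (by name: the statement is the Claim_ definition above) =====
theorem parse_spec : Claim_equal_parse := by
  intro src _
  show parse src = parse_alt src
  exact parse_core ((PySem.Str.split? (PySem.Str.strip src) "\n").getD [])
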